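-- pv_equiv track=rewrite | github.com/ghost-land/Nintendo-eShop-db | script_wiiu/download_wup/Kii-U-Generator-master/FunKiiU-master/generate_commands/extract_commands.py | group_title_ids_by_region
-- ===== SOURCE A (Python) =====
-- def group_title_ids_by_region(data):
--     title_ids_by_region = {}
--
--     # Iterate through each entry in the JSON data
--     for entry in data:
--         title_id = entry["titleID"]
--         region = entry["region"]
--
--         # Group title IDs by region
--         if region not in title_ids_by_region:
--             title_ids_by_region[region] = []
--
--         title_ids_by_region[region].append(title_id)
--
--     return title_ids_by_region
-- ===== SOURCE B (Python) =====
-- def group_title_ids_by_region(data):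
--     # Two-pass grouping: collect the distinct regions in first-occurrence order,
--     # then gather each region's title IDs with a scan per region.
--     regions = list(dict.fromkeys(entry["region"] for entry in data))
--     return {r: [e["titleID"] for e in data if e["region"] == r] for r in regions}
-- ===== Notes on version B (the rewrite author's own statement) =====
-- stated objective: alternative
-- what changed: A builds the dict in one pass with a running dict of lists; B first dedups the regions in first-occurrence order and then builds each region's list by a separate filtering scan of the data.
import Mathlib
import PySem

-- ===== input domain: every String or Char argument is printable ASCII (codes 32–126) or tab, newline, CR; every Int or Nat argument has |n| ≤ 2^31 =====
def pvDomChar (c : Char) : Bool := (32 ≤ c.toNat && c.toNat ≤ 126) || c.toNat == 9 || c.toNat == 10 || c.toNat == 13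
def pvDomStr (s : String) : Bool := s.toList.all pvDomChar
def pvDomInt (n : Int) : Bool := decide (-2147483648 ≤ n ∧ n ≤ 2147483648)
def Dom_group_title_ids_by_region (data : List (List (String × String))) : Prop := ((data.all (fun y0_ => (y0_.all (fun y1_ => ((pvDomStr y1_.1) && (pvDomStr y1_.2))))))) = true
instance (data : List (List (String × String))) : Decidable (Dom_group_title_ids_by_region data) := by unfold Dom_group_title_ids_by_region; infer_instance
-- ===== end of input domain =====

-- B replaces A's one-pass running dict of lists by dedup-the-regions then one filtering scan per region (return-value equivalence; neither mutates its input).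

-- entry[k] for an entry dict given as an association list: first match (KeyError = none, excluded by Pre_; "" is never reached under Pre_)
def pvKGet (e : List (String × String)) (k : String) : String :=
  (((e.find? (fun p => p.1 == k)).map (fun p => p.2)).getD "")

-- ===== PORT A =====
def pvStepA (d : PySem.Dict String (List String)) (e : List (String × String)) : PySem.Dict String (List String) :=
  let title := pvKGet e "titleID"
  let region := pvKGet e "region"
  let d := if d.contains region then d else d.insert region []
  d.modify region [] (fun l => l ++ [title])

def group_title_ids_by_region (data : List (List (String × String))) : List (String × List String) :=
  (data.foldl pvStepA PySem.Dict.empty).items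

-- ===== PORT B =====
def group_title_ids_by_region_alt (data : List (List (String × String))) : List (String × List String) :=
  let regions := PySem.List.dedup (data.map (fun e => pvKGet e "region"))
  regions.map (fun r => (r, (data.filter (fun e => pvKGet e "region" == r)).map (fun e => pvKGet e "titleID")))

-- ===== PRECONDITION & SPEC =====
-- Pre_ excludes exactly the entries on which Python A raises KeyError: an entry dict missing the "titleID" or "region" key.
def Pre_group_title_ids_by_region (data : List (List (String × String))) : Prop :=
  ∀ e ∈ data, "titleID" ∈ e.map Prod.fst ∧ "region" ∈ e.map Prod.fst
instance (data : List (List (String × String))) : Decidable (Pre_group_title_ids_by_region data) := by unfold Pre_group_title_ids_by_region; infer_instance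
def pvWitness_group_title_ids_by_region : (List (List (String × String))) :=
  [[("titleID", "0005000010100600"), ("region", "EUR")], [("titleID", "0005000010100700"), ("region", "USA")]]

def Spec_group_title_ids_by_region (data : List (List (String × String))) (out : List (String × List String)) : Prop := out = group_title_ids_by_region_alt data
instance (data : List (List (String × String))) (out : List (String × List String)) : Decidable (Spec_group_title_ids_by_region data out) := by unfold Spec_group_title_ids_by_region; infer_instance

-- ===== CLAIM (what is proved, stated in full; the proofs are below) =====
def Claim_equal_group_title_ids_by_region : Prop := ∀ (data : List (List (String × String))), Dom_group_title_ids_by_region data → Pre_group_title_ids_by_region data → Spec_group_title_ids_by_region data (group_title_ids_by_region data)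

-- ===== LEMMAS AND PROOFS =====

theorem pv_getD_stepA (d : PySem.Dict String (List String)) (e : List (String × String)) (k : String) :
    (pvStepA d e).getD k [] =
      if k = pvKGet e "region" then d.getD (pvKGet e "region") [] ++ [pvKGet e "titleID"] else d.getD k [] := by
  unfold pvStepA
  by_cases h : d.contains (pvKGet e "region") = true
  · simp [h, PySem.Dict.getD_modify]
  · simp only [Bool.not_eq_true] at h
    simp only [h, Bool.false_eq_true, if_false]
    rw [PySem.Dict.getD_modify]
    by_cases hk : k = pvKGet e "region"
    · simp [hk, PySem.Dict.getD_insert_self, PySem.Dict.getD_of_not_contains d _ h]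
    · simp [hk, PySem.Dict.getD_insert_of_ne _ _ _ hk]

theorem pv_keys_stepA (d : PySem.Dict String (List String)) (e : List (String × String)) :
    (pvStepA d e).keys = PySem.Set.add d.keys (pvKGet e "region") := by
  unfold pvStepA
  have hc : ∀ (d : PySem.Dict String (List String)) (k : String),
      d.contains k = PySem.Set.contains d.keys k := by
    intro d k
    simp [PySem.Dict.contains_eq_decide_mem_keys, PySem.Set.contains]
  by_cases h : d.contains (pvKGet e "region") = true
  · simp only [h, if_true, PySem.Dict.keys_modify,
      PySem.Dict.keys_insert_of_contains d _ h, PySem.Set.add, ← hc]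
  · simp only [Bool.not_eq_true] at h
    simp only [h, Bool.false_eq_true, if_false, PySem.Dict.keys_modify]
    rw [PySem.Dict.keys_insert_of_contains _ _ (PySem.Dict.contains_insert_self d _ _)]
    rw [PySem.Dict.keys_insert_of_not_contains d _ h]
    simp only [PySem.Dict.contains_eq_decide_mem_keys, decide_eq_false_iff_not] at h
    simp [PySem.Set.add, PySem.Set.contains, h]

theorem pv_foldA_getD (l : List (List (String × String))) (d : PySem.Dict String (List String)) (k : String) :
    (l.foldl pvStepA d).getD k [] =
      d.getD k [] ++ (l.filter (fun e => pvKGet e "region" == k)).map (fun e => pvKGet e "titleID") := by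
  induction l generalizing d with
  | nil => simp
  | cons e rest ih =>
    simp only [List.foldl_cons, ih, pv_getD_stepA, List.filter_cons]
    by_cases hk : k = pvKGet e "region"
    · simp [hk, List.append_assoc]
    · simp [hk, Ne.symm hk, beq_iff_eq]

theorem pv_foldA_keys (l : List (List (String × String))) (d : PySem.Dict String (List String)) :
    (l.foldl pvStepA d).keys = PySem.Set.update d.keys (l.map (fun e => pvKGet e "region")) := by
  induction l generalizing d with
  | nil => simp [PySem.Set.update]
  | cons e rest ih => simp [PySem.Set.update, pv_keys_stepA, ih]

-- ===== VERDICT (by name: the statement is the Claim_ definition above) =====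
theorem group_title_ids_by_region_spec : Claim_equal_group_title_ids_by_region := by
  intro data _ _
  unfold Spec_group_title_ids_by_region group_title_ids_by_region group_title_ids_by_region_alt
  have hkeys := pv_foldA_keys data PySem.Dict.empty
  have hnd : (data.foldl pvStepA PySem.Dict.empty).keys.Nodup := by
    rw [hkeys]
    simp [PySem.Set.update_nil_left, PySem.Set.nodup_ofList]
  rw [PySem.Dict.items_eq_map_keys _ hnd []]
  rw [hkeys]
  simp only [PySem.Dict.keys_empty, PySem.Set.update_nil_left, PySem.List.dedup_eq_ofList]
  have hfun : (fun k => (k, (data.foldl pvStepA PySem.Dict.empty).getD k []))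
      = fun r => (r, (data.filter (fun e => pvKGet e "region" == r)).map (fun e => pvKGet e "titleID")) := by
    funext k
    simp [pv_foldA_getD, PySem.Dict.getD_empty]
  rw [hfun]
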